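-- pv_equiv track=rewrite | github.com/georgepullen/autoresearch-continual-learning | scripts/profile_visible_dev.py | truncate_at_turn_boundary
-- ===== SOURCE A (Python) =====
-- def truncate_at_turn_boundary(text: str) -> str:
--     boundaries = [
--         "\nQ:",
--         "\nQuestion:",
--         "\nUser:",
--         "\nAssistant:",
--         "\\nQ:",
--         "\\nQuestion:",
--         "\\nUser:",
--         "\\nAssistant:",
--     ]
--     end = len(text)
--     for marker in boundaries:
--         idx = text.find(marker)
--         if idx != -1:
--             end = min(end, idx)
--     return text[:end].strip()
-- ===== SOURCE B (Python) =====
-- def truncate_at_turn_boundary(text: str) -> str: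
--     boundaries = (
--         "\nQ:",
--         "\nQuestion:",
--         "\nUser:",
--         "\nAssistant:",
--         "\\nQ:",
--         "\\nQuestion:",
--         "\\nUser:",
--         "\\nAssistant:",
--     )
--     for i in range(len(text)):
--         if text.startswith(boundaries, i):
--             return text[:i].strip()
--     return text.strip()
-- ===== Notes on version B (the rewrite author's own statement) =====
-- stated objective: alternative
-- what changed: Replaces the eight whole-string find scans combined by min with a single left-to-right scan that stops at the first position where any boundary marker starts (tuple-argument str.startswith).
import Mathlib
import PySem

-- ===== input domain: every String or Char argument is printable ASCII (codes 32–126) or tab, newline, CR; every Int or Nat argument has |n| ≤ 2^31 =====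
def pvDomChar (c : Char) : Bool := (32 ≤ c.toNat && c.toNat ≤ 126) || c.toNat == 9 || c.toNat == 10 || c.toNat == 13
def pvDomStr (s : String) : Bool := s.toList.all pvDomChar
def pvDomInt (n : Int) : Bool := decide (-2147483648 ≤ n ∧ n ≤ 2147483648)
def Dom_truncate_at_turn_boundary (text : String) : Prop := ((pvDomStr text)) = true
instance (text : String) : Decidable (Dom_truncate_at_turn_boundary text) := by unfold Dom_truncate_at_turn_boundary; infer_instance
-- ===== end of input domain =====

-- B replaces A's eight whole-string find scans (combined by min) with one left-to-right
-- scan stopping at the first position where any boundary marker starts (objective: alternative).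

-- ===== PORT A =====
def pvBoundaries : List String :=
  ["\nQ:", "\nQuestion:", "\nUser:", "\nAssistant:",
   "\\nQ:", "\\nQuestion:", "\\nUser:", "\\nAssistant:"]

def truncate_at_turn_boundary (text : String) : String :=
  let e : Int := pvBoundaries.foldl (fun e marker =>
      let idx := PySem.Str.find text marker
      if idx ≠ -1 then min e idx else e) (PySem.Str.len text)
  PySem.Str.strip (PySem.Str.slice text none (some e))

-- ===== PORT B =====
def pvBoundaryChars : List (List Char) :=
  ["\nQ:".toList, "\nQuestion:".toList, "\nUser:".toList, "\nAssistant:".toList,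
   "\\nQ:".toList, "\\nQuestion:".toList, "\\nUser:".toList, "\\nAssistant:".toList]

-- the for-loop of Source B: walk the positions left to right, stop at the first boundary hit
def pvScan : List Char → Nat → Nat
  | [], i => i
  | c :: rest, i =>
      if pvBoundaryChars.any (fun m => PySem.Chars.startswith (c :: rest) m) then i
      else pvScan rest (i + 1)

def truncate_at_turn_boundary_alt (text : String) : String :=
  let i := pvScan text.toList 0
  PySem.Str.strip (PySem.Str.slice text none (some (i : Int)))

-- ===== PRECONDITION & SPEC =====
def Spec_truncate_at_turn_boundary (text : String) (out : String) : Prop := out = truncate_at_turn_boundary_alt text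
instance (text : String) (out : String) : Decidable (Spec_truncate_at_turn_boundary text out) := by unfold Spec_truncate_at_turn_boundary; infer_instance

-- ===== CLAIM (what is proved, stated in full; the proofs are below) =====
def Claim_equal_truncate_at_turn_boundary : Prop := ∀ (text : String), Dom_truncate_at_turn_boundary text → Spec_truncate_at_turn_boundary text (truncate_at_turn_boundary text)

-- ===== LEMMAS AND PROOFS =====

-- "some marker starts at position i of cs"
def pvHit (cs : List Char) (i : Nat) : Prop := ∃ m ∈ pvBoundaryChars, m <+: cs.drop i

lemma pvAny_iff_hit (cs : List Char) (i : Nat) :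
    (pvBoundaryChars.any (fun m => PySem.Chars.startswith (cs.drop i) m) = true) ↔ pvHit cs i := by
  simp [List.any_eq_true, pvHit, PySem.Chars.startswith_iff]

-- B-side invariant: pvScan run on the suffix cs.drop i returns the first hit position ≥ i (or cs.length)
lemma pvScan_inv (cs : List Char) (n : Nat) : ∀ i, i ≤ cs.length → cs.length - i = n →
    i ≤ pvScan (cs.drop i) i ∧ pvScan (cs.drop i) i ≤ cs.length ∧
    (∀ j, i ≤ j → j < pvScan (cs.drop i) i → ¬ pvHit cs j) ∧
    (pvHit cs (pvScan (cs.drop i) i) ∨ pvScan (cs.drop i) i = cs.length) := by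
  induction n with
  | zero =>
    intro i hle hn
    have hi : i = cs.length := by omega
    have hdrop : cs.drop i = [] := by simp [hi]
    rw [hdrop]
    simp [pvScan, hi]
    omega
  | succ n ih =>
    intro i hle hn
    have hlt : i < cs.length := by omega
    have hdrop : cs.drop i = cs[i] :: cs.drop (i + 1) := List.drop_eq_getElem_cons hlt
    rw [hdrop]
    simp only [pvScan]
    by_cases h : pvBoundaryChars.any (fun m => PySem.Chars.startswith (cs[i] :: cs.drop (i + 1)) m) = true
    · rw [if_pos h]
      have hhit : pvHit cs i := by
        rw [← pvAny_iff_hit]; rw [hdrop]; exact h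
      exact ⟨le_refl _, by omega, by intro j h1 h2; omega, Or.inl hhit⟩
    · rw [if_neg h]
      have hnot : ¬ pvHit cs i := by
        rw [← pvAny_iff_hit]; rw [hdrop]; exact h
      obtain ⟨h1, h2, h3, h4⟩ := ih (i + 1) (by omega) (by omega)
      refine ⟨by omega, h2, ?_, h4⟩
      intro j hj1 hj2
      rcases Nat.eq_or_lt_of_le hj1 with rfl | hj
      · exact hnot
      · exact h3 j hj hj2

-- A-side invariant for the fold over the markers
lemma pvFold_inv (text : String) : ∀ (ms : List String) (acc : Int),
    let r := ms.foldl (fun e marker =>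
      let idx := PySem.Str.find text marker
      if idx ≠ -1 then min e idx else e) acc
    r ≤ acc ∧ (0 ≤ acc → 0 ≤ r) ∧
    (r = acc ∨ ∃ m ∈ ms, PySem.Str.find text m = r) ∧
    (∀ m ∈ ms, PySem.Str.find text m = -1 ∨ r ≤ PySem.Str.find text m) := by
  intro ms
  induction ms with
  | nil => intro acc; exact ⟨le_refl _, fun h => h, Or.inl rfl, by simp⟩
  | cons m tl ih =>
    intro acc
    simp only [List.foldl_cons]
    by_cases hm : PySem.Str.find text m ≠ -1
    · rw [if_pos hm]
      have hge : (0:Int) ≤ PySem.Str.find text m := by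
        have := PySem.Chars.neg_one_le_find text.toList m.toList
        rw [PySem.Str.find_eq] at hm ⊢
        omega
      obtain ⟨h1, h2, h3, h4⟩ := ih (min acc (PySem.Str.find text m))
      refine ⟨le_trans h1 (min_le_left _ _),
              fun h0 => h2 (le_min h0 hge), ?_, ?_⟩
      · rcases h3 with h3 | ⟨m', hm', hf⟩
        · by_cases hc : acc ≤ PySem.Str.find text m
          · exact Or.inl (by rw [h3, min_eq_left hc])
          · exact Or.inr ⟨m, by simp, by rw [h3, min_eq_right (by omega)]⟩
        · exact Or.inr ⟨m', List.mem_cons_of_mem _ hm', hf⟩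
      · intro m' hm'
        rcases List.mem_cons.mp hm' with rfl | hm'
        · exact Or.inr (le_trans h1 (min_le_right _ _))
        · exact h4 m' hm'
    · rw [if_neg hm]
      obtain ⟨h1, h2, h3, h4⟩ := ih acc
      refine ⟨h1, h2, ?_, ?_⟩
      · rcases h3 with h3 | ⟨m', hm', hf⟩
        · exact Or.inl h3
        · exact Or.inr ⟨m', List.mem_cons_of_mem _ hm', hf⟩
      · intro m' hm'
        rcases List.mem_cons.mp hm' with rfl | hm'
        · exact Or.inl (by omega)
        · exact h4 m' hm'

lemma pvBoundaryChars_eq : pvBoundaryChars = pvBoundaries.map String.toList := by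
  simp [pvBoundaryChars, pvBoundaries]

-- the heart: A's min-of-finds index equals B's first-hit scan index
lemma pvIndex_eq (text : String) :
    pvBoundaries.foldl (fun e marker =>
      let idx := PySem.Str.find text marker
      if idx ≠ -1 then min e idx else e) (PySem.Str.len text)
    = (pvScan text.toList 0 : Int) := by
  set cs := text.toList with hcs
  obtain ⟨hA1, hA2, hA3, hA4⟩ := pvFold_inv text pvBoundaries (PySem.Str.len text)
  set e := pvBoundaries.foldl (fun e marker =>
      let idx := PySem.Str.find text marker
      if idx ≠ -1 then min e idx else e) (PySem.Str.len text) with he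
  obtain ⟨hB1, hB2, hB3, hB4⟩ := pvScan_inv cs cs.length 0 (by omega) (by omega)
  simp only [List.drop_zero] at hB1 hB2 hB3 hB4
  set r := pvScan cs 0 with hr
  rw [PySem.Str.len_eq, ← hcs] at hA1 hA2 hA3
  have he0 : 0 ≤ e := hA2 (by positivity)
  -- a := e.toNat; facts about a
  have hAle : e ≤ (cs.length : Int) := hA1
  -- no hit strictly below e
  have hAnohit : ∀ i : Nat, (i : Int) < e → ¬ pvHit cs i := by
    intro i hi hhit
    obtain ⟨ml, hml, hpre⟩ := hhit
    rw [pvBoundaryChars_eq] at hml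
    obtain ⟨m, hm, rfl⟩ := List.mem_map.mp hml
    rcases hA4 m hm with hneg | hle
    · rw [PySem.Str.find_eq, ← hcs] at hneg
      have : ¬ m.toList <:+: cs := (PySem.Chars.find_eq_neg_one_iff _ _).mp hneg
      exact this ((PySem.Chars.isIn_iff_infix _ _).mp
        ((PySem.Chars.exists_prefix_drop_iff_isIn _ _).mp ⟨i, hpre⟩))
    · rw [PySem.Str.find_eq, ← hcs] at hle
      have hfge : 0 ≤ PySem.Chars.find cs m.toList := le_trans he0 hle
      obtain ⟨_, hmin⟩ := PySem.Chars.find_spec hfge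
      exact hmin i (by omega) hpre
  -- e is a hit or the length
  have hAhit : pvHit cs e.toNat ∨ e = (cs.length : Int) := by
    rcases hA3 with h | ⟨m, hm, hf⟩
    · exact Or.inr h
    · left
      rw [PySem.Str.find_eq, ← hcs] at hf
      have hfge : 0 ≤ PySem.Chars.find cs m.toList := by omega
      obtain ⟨hpre, _⟩ := PySem.Chars.find_spec hfge
      rw [hf] at hpre
      exact ⟨m.toList, by rw [pvBoundaryChars_eq]; exact List.mem_map_of_mem hm, hpre⟩
  -- uniqueness
  rcases lt_trichotomy e (r : Int) with hlt | heq | hgt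
  · exfalso
    rcases hAhit with hhit | hl
    · exact hB3 e.toNat (by omega) (by omega) hhit
    · omega
  · exact heq
  · exfalso
    rcases hB4 with hhit | hl
    · exact hAnohit r hgt hhit
    · omega

-- ===== VERDICT (by name: the statement is the Claim_ definition above) =====
theorem truncate_at_turn_boundary_spec : Claim_equal_truncate_at_turn_boundary := by
  intro text _
  unfold Spec_truncate_at_turn_boundary truncate_at_turn_boundary truncate_at_turn_boundary_alt
  simp only []
  rw [pvIndex_eq]
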